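-- pv_equiv track=rewrite | github.com/G2Lab/PrecisionChain | insertData-variantPerson.py | chunkDictionary
-- ===== SOURCE A (Python) =====
-- from itertools import islice
--
-- def chunkDictionary(values_dict, SIZE=2000):
--     '''
--     chunk the person variant dictionary as its too large for a single entry
--     Input:
--         values_dict: person variant dictionary from extractPersonVariants
--     '''
--     def chunks(values_dict, SIZE=2000):
--         it = iter(values_dict)
--         for i in range(0, len(values_dict), SIZE):
--             yield {k:values_dict[k] for k in islice(it, SIZE)}
--
--     split_variants = {}
--     for i, chunk in enumerate(chunks(values_dict, SIZE = 2000)):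
--         split_variants[i] = chunk
--     return split_variants
-- ===== SOURCE B (Python) =====
-- def chunkDictionary(values_dict, SIZE=2000):
--     '''
--     chunk the person variant dictionary as its too large for a single entry
--     (chunk size is the literal 2000, matching the original, which ignores SIZE)
--     '''
--     split_variants = {}
--     for idx, (k, v) in enumerate(values_dict.items()):
--         split_variants.setdefault(idx // 2000, {})[k] = v
--     return split_variants
-- ===== Notes on version B (the rewrite author's own statement) =====
-- stated objective: simpler
-- what changed: Replaces the islice/range generator that slices the key iterator into 2000-key batches (with per-key dict lookups and an enumerate loop collecting the yielded chunks) by one flat loop over enumerate(values_dict.items()) that places each pair directly into bucket idx // 2000 via setdefault; the chunk size stays the literal 2000, exactly as A, which ignores its SIZE parameter.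
import Mathlib
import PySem

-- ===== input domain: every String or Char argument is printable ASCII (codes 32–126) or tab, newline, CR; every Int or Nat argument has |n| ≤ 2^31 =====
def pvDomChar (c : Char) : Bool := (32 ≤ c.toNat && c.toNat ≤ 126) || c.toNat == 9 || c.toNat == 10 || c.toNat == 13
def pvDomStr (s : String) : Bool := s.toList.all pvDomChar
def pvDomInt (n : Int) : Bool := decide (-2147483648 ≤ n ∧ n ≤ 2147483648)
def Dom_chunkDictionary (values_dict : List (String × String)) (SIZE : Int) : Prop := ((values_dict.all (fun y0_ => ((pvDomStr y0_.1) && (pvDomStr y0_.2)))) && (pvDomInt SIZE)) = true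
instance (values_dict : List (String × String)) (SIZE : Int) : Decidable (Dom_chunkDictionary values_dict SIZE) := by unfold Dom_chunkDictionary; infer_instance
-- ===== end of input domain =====

-- B replaces A's islice/range chunk generator by one flat loop that buckets each item at index idx // 2000 via setdefault (simpler decomposition, same O(n) cost).


-- ===== PORT A =====
-- chunks(values_dict, SIZE=2000) generator: for i in range(0, len, 2000) take the next
-- 2000 keys from the shared iterator and yield {k: values_dict[k] for k in ...};
-- then split_variants[i] = chunk for i, chunk in enumerate(...).
def chunkDictionary (values_dict : List (String × String)) (SIZE : Int) : List (Int × List (String × String)) :=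
  let chunksList : List (PySem.Dict String String) :=
    ((PySem.List.pyRange 0 (values_dict.length : Int) 2000).foldl
      (fun (st : List String × List (PySem.Dict String String)) _ =>
        let chunk := (st.1.take 2000).foldl
          (fun (c : PySem.Dict String String) k =>
            c.insert k ((PySem.Dict.mk values_dict).getD k "")) PySem.Dict.empty
        (st.1.drop 2000, st.2 ++ [chunk]))
      (values_dict.map Prod.fst, [])).2
  let split := (PySem.List.enumerate chunksList 0).foldl
    (fun (d : PySem.Dict Int (PySem.Dict String String)) p => d.insert p.1 p.2)
    PySem.Dict.empty
  split.items.map (fun p => (p.1, p.2.items))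

-- ===== PORT B =====
-- for idx, (k, v) in enumerate(values_dict.items()): split_variants.setdefault(idx // 2000, {})[k] = v
def chunkDictionary_alt (values_dict : List (String × String)) (SIZE : Int) : List (Int × List (String × String)) :=
  let split := (PySem.List.enumerate values_dict 0).foldl
    (fun (d : PySem.Dict Int (PySem.Dict String String)) p =>
      let b := PySem.Int.floordiv p.1 2000
      (d.setdefault b PySem.Dict.empty).modify b PySem.Dict.empty
        (fun m => m.insert p.2.1 p.2.2))
    PySem.Dict.empty
  split.items.map (fun p => (p.1, p.2.items))

-- ===== PRECONDITION & SPEC =====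
-- Pre_ excludes association lists with duplicate keys: they do not represent any Python dict
-- (the function always receives a dict, whose keys are unique), so neither behaviour is
-- specified there; A's first-match comprehension lookup and B's overwriting insert are both
-- defensible choices on such lists.
def Pre_chunkDictionary (values_dict : List (String × String)) (SIZE : Int) : Prop :=
  (values_dict.map Prod.fst).Nodup
instance (values_dict : List (String × String)) (SIZE : Int) : Decidable (Pre_chunkDictionary values_dict SIZE) := by unfold Pre_chunkDictionary; infer_instance
def pvWitness_chunkDictionary : (List (String × String)) × Int := ([("a", "1"), ("b", "2")], 2000)

def Spec_chunkDictionary (values_dict : List (String × String)) (SIZE : Int) (out : List (Int × List (String × String))) : Prop := out = chunkDictionary_alt values_dict SIZE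
instance (values_dict : List (String × String)) (SIZE : Int) (out : List (Int × List (String × String))) : Decidable (Spec_chunkDictionary values_dict SIZE out) := by unfold Spec_chunkDictionary; infer_instance

-- ===== CLAIM (what is proved, stated in full; the proofs are below) =====
def Claim_equal_chunkDictionary : Prop := ∀ (values_dict : List (String × String)) (SIZE : Int), Dom_chunkDictionary values_dict SIZE → Pre_chunkDictionary values_dict SIZE → Spec_chunkDictionary values_dict SIZE (chunkDictionary values_dict SIZE)

-- ===== LEMMAS AND PROOFS =====

-- the chunk dict both sides build for one 2000-slice: insert every pair in order
def chunkDictOf (l : List (String × String)) : PySem.Dict String String :=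
  l.foldl (fun c p => c.insert p.1 p.2) PySem.Dict.empty

-- reference chunking: the list of chunk dicts, 2000 pairs each
def refChunks (ys : List (String × String)) : List (PySem.Dict String String) :=
  if h : ys = [] then [] else chunkDictOf (ys.take 2000) :: refChunks (ys.drop 2000)
termination_by ys.length
decreasing_by
  cases ys with
  | nil => exact absurd rfl h
  | cons a l => simp [List.length_drop]

lemma refChunks_nil : refChunks [] = [] := by
  rw [refChunks]; simp

lemma refChunks_cons (ys : List (String × String)) (h : ys ≠ []) :
    refChunks ys = chunkDictOf (ys.take 2000) :: refChunks (ys.drop 2000) := by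
  rw [refChunks]; simp [h]

lemma dict_insert_fresh {κ ν : Type} [BEq κ] [LawfulBEq κ] (d : PySem.Dict κ ν) (k : κ) (v : ν)
    (h : d.contains k = false) : d.insert k v = PySem.Dict.mk (d.items ++ [(k, v)]) := by
  apply PySem.Dict.ext
  rw [PySem.Dict.items_insert_of_not_contains _ _ h]

lemma getD_mk_append_last {ν : Type} (base : List (Int × ν)) (q : Int) (m d0 : ν)
    (h : q ∉ base.map Prod.fst) :
    (PySem.Dict.mk (base ++ [(q, m)])).getD q d0 = m := by
  induction base with
  | nil =>
      simp [PySem.Dict.getD_eq_get?_getD, PySem.Dict.get?_mk_cons]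
  | cons p rest ih =>
      have hne : p.1 ≠ q := by
        intro he; exact h (by simp [he])
      have h' : q ∉ rest.map Prod.fst := by
        intro hm; exact h (by simp [hm])
      rw [List.cons_append, PySem.Dict.getD_eq_get?_getD, PySem.Dict.get?_mk_cons,
        if_neg (by simp [hne]), ← PySem.Dict.getD_eq_get?_getD]
      exact ih h'

lemma mem_keys_mk_append_last {ν : Type} (base : List (Int × ν)) (q : Int) (m : ν) :
    q ∈ (PySem.Dict.mk (base ++ [(q, m)])).keys := by
  simp only [PySem.Dict.keys]
  simp

lemma insert_mk_append_last {ν : Type} (base : List (Int × ν)) (q : Int) (m v : ν)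
    (h : q ∉ base.map Prod.fst) :
    (PySem.Dict.mk (base ++ [(q, m)])).insert q v = PySem.Dict.mk (base ++ [(q, v)]) := by
  apply PySem.Dict.ext
  have hc : (PySem.Dict.mk (base ++ [(q, m)])).contains q = true := by
    rw [PySem.Dict.contains_iff_mem_keys]
    exact mem_keys_mk_append_last base q m
  rw [PySem.Dict.items_insert_of_contains _ _ hc]
  show (base ++ [(q, m)]).map _ = _
  rw [List.map_append]
  congr 1
  · refine (List.map_congr_left fun p hp => ?_).trans (List.map_id base)
    have hne : (p.1 == q) = false := by
      simp only [beq_eq_false_iff_ne]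
      intro he
      exact h (by simpa [he] using (List.mem_map_of_mem hp : p.1 ∈ base.map Prod.fst))
    simp [hne]
  · simp

-- B's inner loop within one already-open bucket q: every index lands in bucket q,
-- so the fold just inserts the pairs into the bucket's dict
lemma innerB (ws : List (String × String)) (base : List (Int × PySem.Dict String String))
    (q : Int) (m : PySem.Dict String String) (t : Int)
    (hb : q ∉ base.map Prod.fst) (h1 : 2000 * q ≤ t) (h2 : t + ws.length ≤ 2000 * (q + 1)) :
    (PySem.List.enumerate ws t).foldl
      (fun (d : PySem.Dict Int (PySem.Dict String String)) p =>
        let b := PySem.Int.floordiv p.1 2000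
        (d.setdefault b PySem.Dict.empty).modify b PySem.Dict.empty
          (fun mm => mm.insert p.2.1 p.2.2))
      (PySem.Dict.mk (base ++ [(q, m)]))
    = PySem.Dict.mk (base ++ [(q, ws.foldl (fun c p => c.insert p.1 p.2) m)]) := by
  induction ws generalizing m t with
  | nil => simp [PySem.List.enumerate_nil]
  | cons p ws ih =>
      have hq : PySem.Int.floordiv t 2000 = q := by
        rw [PySem.Int.floordiv_eq_iff_of_pos (by norm_num)]
        simp only [List.length_cons] at h2
        push_cast at h2 ⊢
        constructor <;> nlinarith
      have hc : (PySem.Dict.mk (base ++ [(q, m)])).contains q = true := by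
        rw [PySem.Dict.contains_iff_mem_keys]; exact mem_keys_mk_append_last base q m
      have hmod : (PySem.Dict.mk (base ++ [(q, m)])).modify q PySem.Dict.empty
            (fun mm => mm.insert p.1 p.2)
          = PySem.Dict.mk (base ++ [(q, m.insert p.1 p.2)]) := by
        simp only [PySem.Dict.modify]
        rw [getD_mk_append_last base q m _ hb, insert_mk_append_last base q m _ hb]
      rw [PySem.List.enumerate_cons, List.foldl_cons]
      simp only [hq, PySem.Dict.setdefault_of_contains _ _ hc]
      rw [hmod]
      rw [ih (m.insert p.1 p.2) (t + 1) (by omega)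
        (by simp only [List.length_cons] at h2; push_cast at h2 ⊢; omega)]
      rfl

-- B's whole fold starting at an aligned index 2000*q over a dict whose keys are all < q
lemma outerB (n : Nat) (ys : List (String × String))
    (base : List (Int × PySem.Dict String String)) (q : Int)
    (hn : ys.length ≤ n) (hq : 0 ≤ q) (hbase : ∀ p ∈ base, p.1 < q) :
    (PySem.List.enumerate ys (2000 * q)).foldl
      (fun (d : PySem.Dict Int (PySem.Dict String String)) p =>
        let b := PySem.Int.floordiv p.1 2000
        (d.setdefault b PySem.Dict.empty).modify b PySem.Dict.empty
          (fun mm => mm.insert p.2.1 p.2.2))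
      (PySem.Dict.mk base)
    = PySem.Dict.mk (base ++ PySem.List.enumerate (refChunks ys) q) := by
  induction n generalizing ys base q with
  | zero =>
      have : ys = [] := by
        cases ys with
        | nil => rfl
        | cons a l => simp at hn
      subst this
      simp [refChunks_nil, PySem.List.enumerate_nil]
  | succ n ih =>
      cases ys with
      | nil => simp [refChunks_nil, PySem.List.enumerate_nil]
      | cons a zs =>
          have hq2 : PySem.Int.floordiv (2000 * q) 2000 = q := by
            rw [PySem.Int.floordiv_eq_iff_of_pos (by norm_num)]
            constructor <;> nlinarith
          have hfresh : q ∉ base.map Prod.fst := by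
            intro hm
            rcases List.mem_map.mp hm with ⟨p, hp, he⟩
            exact absurd (he ▸ hbase p hp) (lt_irrefl q)
          have hc : (PySem.Dict.mk base).contains q = false := by
            rw [Bool.eq_false_iff]
            intro hcc
            rw [PySem.Dict.contains_iff_mem_keys] at hcc
            exact hfresh hcc
          have hmod : (PySem.Dict.mk (base ++ [(q, PySem.Dict.empty)])).modify q
                PySem.Dict.empty (fun mm => mm.insert a.1 a.2)
              = PySem.Dict.mk (base ++ [(q, PySem.Dict.empty.insert a.1 a.2)]) := by
            simp only [PySem.Dict.modify]
            rw [getD_mk_append_last base q _ _ hfresh,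
              insert_mk_append_last base q _ _ hfresh]
          have hins : (PySem.Dict.mk base).insert q PySem.Dict.empty
              = PySem.Dict.mk (base ++ [(q, PySem.Dict.empty)]) := by
            rw [dict_insert_fresh _ _ _ hc]
          rw [PySem.List.enumerate_cons, List.foldl_cons]
          simp only [hq2, PySem.Dict.setdefault_of_not_contains _ _ hc]
          rw [hins, hmod]
          -- split zs into the rest of this chunk and the remaining chunks
          have hzs : zs = zs.take 1999 ++ zs.drop 1999 := (List.take_append_drop 1999 zs).symm
          rw [show PySem.List.enumerate zs (2000 * q + 1)
                = PySem.List.enumerate (zs.take 1999) (2000 * q + 1)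
                  ++ PySem.List.enumerate (zs.drop 1999) ((2000 * q + 1) + (zs.take 1999).length)
              from by conv_lhs => rw [hzs]
                      exact PySem.List.enumerate_append _ _ _,
            List.foldl_append]
          rw [innerB (zs.take 1999) base q _ (2000 * q + 1) hfresh (by omega)
            (by have := List.length_take_le 1999 zs; omega)]
          have hchunk : (zs.take 1999).foldl (fun c p => c.insert p.1 p.2)
              (PySem.Dict.empty.insert a.1 a.2) = chunkDictOf ((a :: zs).take 2000) := by
            simp [chunkDictOf, List.take_succ_cons]
          rw [hchunk]
          by_cases hlen : zs.length ≤ 1999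
          · have hdrop : zs.drop 1999 = [] := by
              apply List.eq_nil_of_length_eq_zero
              simp [List.length_drop]; omega
            rw [hdrop, PySem.List.enumerate_nil, List.foldl_nil]
            have hd2 : (a :: zs).drop 2000 = [] := by
              apply List.length_eq_zero_iff.mp
              simp [List.length_drop]; omega
            rw [refChunks_cons _ (List.cons_ne_nil a zs), hd2, refChunks_nil]
            simp [PySem.List.enumerate_cons, PySem.List.enumerate_nil]
          · have hlt : 1999 < zs.length := by omega
            have htl : (zs.take 1999).length = 1999 := by
              simp [List.length_take]; omega
            have hst : (2000 * q + 1) + ((zs.take 1999).length : Int) = 2000 * (q + 1) := by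
              rw [htl]; push_cast; ring
            rw [hst]
            rw [ih (zs.drop 1999) (base ++ [(q, chunkDictOf ((a :: zs).take 2000))]) (q + 1)
              (by simp only [List.length_drop, List.length_cons] at hn ⊢; omega) (by omega)
              (by intro p hp
                  rcases List.mem_append.mp hp with h | h
                  · exact lt_trans (hbase p h) (by omega)
                  · obtain rfl := List.mem_singleton.mp h
                    show q < q + 1
                    omega)]
            rw [refChunks_cons _ (List.cons_ne_nil a zs)]
            have hd2 : (a :: zs).drop 2000 = zs.drop 1999 := by
              simp [List.drop_succ_cons]
            rw [hd2, PySem.List.enumerate_cons, List.append_assoc]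
            rfl

-- number of loop iterations of A's range(0, n, 2000)
def numChunks (m : Nat) : Nat := (m + 1999) / 2000

-- A's generator fold: consuming the key iterator 2000 keys at a time, looking every key
-- back up in the full dict, yields exactly the reference chunks (needs unique keys)
lemma lemA_chunks (xs : List (String × String)) (hnd : (xs.map Prod.fst).Nodup)
    (r : List Int) (ys : List (String × String)) (st2 : List (PySem.Dict String String))
    (hsub : ∀ p ∈ ys, p ∈ xs) (hlen : r.length = numChunks ys.length) :
    (r.foldl
      (fun (st : List String × List (PySem.Dict String String)) _ =>
        let chunk := (st.1.take 2000).foldl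
          (fun (c : PySem.Dict String String) k =>
            c.insert k ((PySem.Dict.mk xs).getD k "")) PySem.Dict.empty
        (st.1.drop 2000, st.2 ++ [chunk]))
      (ys.map Prod.fst, st2)).2 = st2 ++ refChunks ys := by
  induction r generalizing ys st2 with
  | nil =>
      have : ys = [] := by
        apply List.length_eq_zero_iff.mp
        simp only [List.length_nil, numChunks] at hlen
        omega
      subst this
      simp [refChunks_nil]
  | cons x r ih =>
      rw [List.foldl_cons]
      have hpos : 0 < ys.length := by
        by_contra h
        have : ys.length = 0 := by omega
        simp [numChunks, this] at hlen
      have hne : ys ≠ [] := by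
        intro h; rw [h] at hpos; simp at hpos
      have hchunk : ((ys.map Prod.fst).take 2000).foldl
          (fun (c : PySem.Dict String String) k =>
            c.insert k ((PySem.Dict.mk xs).getD k "")) PySem.Dict.empty
          = chunkDictOf (ys.take 2000) := by
        rw [← List.map_take, List.foldl_map]
        apply PySem.List.foldl_congr_mem
        intro c p hp
        have hpx : p ∈ xs := hsub p (List.mem_of_mem_take hp)
        have hitems : (p.1, p.2) ∈ (PySem.Dict.mk xs).items := by
          show (p.1, p.2) ∈ xs; simpa using hpx
        have hkeys : (PySem.Dict.mk xs).keys.Nodup := by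
          simpa [PySem.Dict.keys] using hnd
        rw [PySem.Dict.getD_of_mem_items _ hitems hkeys]
      simp only [hchunk, ← List.map_drop]
      rw [ih (ys.drop 2000) (st2 ++ [chunkDictOf (ys.take 2000)])
        (fun p hp => hsub p (List.mem_of_mem_drop hp))
        (by simp only [List.length_cons, numChunks, List.length_drop] at hlen ⊢; omega)]
      conv_rhs => rw [refChunks_cons _ hne]
      simp

-- ===== VERDICT (by name: the statement is the Claim_ definition above) =====
theorem chunkDictionary_spec : Claim_equal_chunkDictionary := by
  intro xs SIZE _ hpre
  show chunkDictionary xs SIZE = chunkDictionary_alt xs SIZE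
  unfold chunkDictionary chunkDictionary_alt
  -- A's chunksList is refChunks xs
  have hlen : (PySem.List.pyRange 0 (xs.length : Int) 2000).length = numChunks xs.length := by
    rw [PySem.List.pyRange_of_pos _ _ (by norm_num)]
    simp only [List.length_map, List.length_range, numChunks]
    split_ifs with h
    · omega
    · omega
  have hA := lemA_chunks xs hpre (PySem.List.pyRange 0 (xs.length : Int) 2000) xs []
    (fun p hp => hp) hlen
  simp only [hA, List.nil_append]
  -- A's enumerate/insert loop is the literal dict of the enumerated chunks
  have hsplitA : ((PySem.List.enumerate (refChunks xs) 0).foldl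
      (fun (d : PySem.Dict Int (PySem.Dict String String)) p => d.insert p.1 p.2)
      PySem.Dict.empty).items = PySem.List.enumerate (refChunks xs) 0 := by
    have := PySem.Dict.items_foldl_insert_fresh (PySem.List.enumerate (refChunks xs) 0)
      (fun p => p.1) (fun p => p.2) PySem.Dict.empty
      (fun a _ => by simp)
      (by rw [PySem.List.map_fst_enumerate]; exact PySem.List.nodup_pyRange_one _ _)
    simpa using this
  rw [hsplitA]
  -- B's fold is the same dict
  have hB := outerB xs.length xs [] 0 (le_refl _) (le_refl _) (by intro p hp; simp at hp)
  rw [show (2000 : Int) * 0 = 0 by ring] at hB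
  have hempty : (PySem.Dict.empty : PySem.Dict Int (PySem.Dict String String))
      = PySem.Dict.mk [] := rfl
  rw [hempty, hB]
  rfl
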